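-- pv_equiv track=rewrite | github.com/Imran7junior/leetcode | 868. binary-gap.py | binaryGap
-- ===== SOURCE A (Python) =====
-- def binaryGap(n: int) -> int:
--     last_position = -1
--     max_gap = 0
--     position = 0
--
--     while n > 0:
--         if n & 1:
--             if last_position != -1:
--                 max_gap = max(max_gap, position - last_position)
--             last_position = position
--
--         n >>= 1
--         position += 1
--
--     return max_gap
-- ===== SOURCE B (Python) =====
-- def binaryGap(n: int) -> int:
--     if n <= 0:
--         return 0
--     positions = [i for i in range(n.bit_length()) if (n >> i) & 1]
--     gaps = [b - a for a, b in zip(positions, positions[1:])]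
--     return max(gaps, default=0)
-- ===== Notes on version B (the rewrite author's own statement) =====
-- stated objective: alternative
-- what changed: B replaces A's single running-max bit-scan (threading last_position/max_gap through a while loop) by a two-phase decomposition: first materialize the list of set-bit positions, then take the maximum of consecutive pairwise differences.
import Mathlib
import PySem

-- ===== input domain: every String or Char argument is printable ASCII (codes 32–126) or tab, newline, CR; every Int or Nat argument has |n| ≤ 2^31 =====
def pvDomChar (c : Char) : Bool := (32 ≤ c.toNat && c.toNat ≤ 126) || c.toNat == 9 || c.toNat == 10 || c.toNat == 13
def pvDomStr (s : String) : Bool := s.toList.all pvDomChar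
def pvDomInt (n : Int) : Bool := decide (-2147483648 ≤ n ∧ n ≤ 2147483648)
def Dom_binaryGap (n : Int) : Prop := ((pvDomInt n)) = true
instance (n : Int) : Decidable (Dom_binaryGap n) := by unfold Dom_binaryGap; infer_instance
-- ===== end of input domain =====

-- B replaces A's running-max bit-scan by a two-phase build-positions-then-max-of-diffs decomposition; same cost, no speed claim.

-- ===== PORT A =====
-- the while loop of A, step for step: state (n, last_position, max_gap, position)
def binaryGapLoop (n lastPos maxGap pos : Int) : Int :=
  if h : 0 < n then
    if PySem.Int.mod n 2 = 1 then  -- n & 1 (truthy iff 1 for n > 0)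
      binaryGapLoop (PySem.Int.floordiv n 2) pos
        (if lastPos ≠ -1 then max maxGap (pos - lastPos) else maxGap) (pos + 1)
    else
      binaryGapLoop (PySem.Int.floordiv n 2) lastPos maxGap (pos + 1)
  else maxGap
termination_by n.toNat
decreasing_by
  all_goals
    rw [PySem.Int.floordiv_eq_ediv_of_pos (by omega)]
    omega

def binaryGap (n : Int) : Int := binaryGapLoop n (-1) 0 0

-- ===== PORT B =====
-- n.bit_length() for n > 0 is exactly Nat.log2 n.toNat + 1; positions hold nonnegative
-- ints, kept as Nat here; (n >> i) & 1 is n.toNat >>> i % 2; positions[1:] is .tail.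
def binaryGap_alt (n : Int) : Int :=
  if n ≤ 0 then 0
  else
    let m := n.toNat
    let positions : List Nat := (List.range (Nat.log2 m + 1)).filter (fun i => m >>> i % 2 == 1)
    let gaps : List Int := (positions.zip positions.tail).map (fun q => (q.2 : Int) - (q.1 : Int))
    (PySem.List.max? gaps (fun x => x)).getD 0

-- ===== PRECONDITION & SPEC =====
def Spec_binaryGap (n : Int) (out : Int) : Prop := out = binaryGap_alt n
instance (n : Int) (out : Int) : Decidable (Spec_binaryGap n out) := by unfold Spec_binaryGap; infer_instance

-- ===== CLAIM (what is proved, stated in full; the proofs are below) =====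
def Claim_equal_binaryGap : Prop := ∀ (n : Int), Dom_binaryGap n → Spec_binaryGap n (binaryGap n)

-- ===== LEMMAS AND PROOFS =====

-- list of set-bit positions of m, offset by base
def posListN (m b : Nat) : List Nat :=
  if hm : m = 0 then [] else (if m % 2 = 1 then [b] else []) ++ posListN (m / 2) (b + 1)
termination_by m
decreasing_by exact Nat.div_lt_self (Nat.pos_of_ne_zero hm) one_lt_two

-- A's loop, abstracted over the list of positions it will visit
def gapFold : List Nat → Int → Int → Int
  | [], _, maxg => maxg
  | p :: ps, last, maxg =>
      gapFold ps (p : Int) (if last ≠ -1 then max maxg ((p : Int) - last) else maxg)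

lemma loop_eq (m : Nat) : ∀ (b : Nat) (last maxg : Int),
    binaryGapLoop (m : Int) last maxg (b : Int) = gapFold (posListN m b) last maxg := by
  induction m using Nat.strong_induction_on with
  | _ m ih =>
    intro b last maxg
    rw [binaryGapLoop, posListN]
    by_cases hm : m = 0
    · simp [hm, gapFold]
    · have hpos : (0 : Int) < (m : Int) := by exact_mod_cast Nat.pos_of_ne_zero hm
      have hdiv : PySem.Int.floordiv (m : Int) 2 = ((m / 2 : Nat) : Int) := by
        exact_mod_cast PySem.Int.floordiv_natCast m 2
      have hmod : PySem.Int.mod (m : Int) 2 = ((m % 2 : Nat) : Int) := by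
        exact_mod_cast PySem.Int.mod_natCast m 2
      have hlt : m / 2 < m := Nat.div_lt_self (Nat.pos_of_ne_zero hm) one_lt_two
      by_cases h1 : m % 2 = 1
      · simp only [hpos, dif_pos, hmod, h1, hdiv, Nat.cast_one, if_pos rfl, hm, dif_neg,
          not_false_iff]
        have : ((b : Int) + 1) = ((b + 1 : Nat) : Int) := by push_cast; ring
        rw [this, ih (m / 2) hlt (b + 1)]
        simp [h1, gapFold]
      · have h1' : ((m % 2 : Nat) : Int) ≠ 1 := by omega
        simp only [hpos, dif_pos, hmod, if_neg h1', hm, dif_neg, not_false_iff, hdiv]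
        have : ((b : Int) + 1) = ((b + 1 : Nat) : Int) := by push_cast; ring
        rw [this, ih (m / 2) hlt (b + 1)]
        simp [h1]

-- every element of posListN m b is ≥ b
lemma posListN_ge (m : Nat) : ∀ (b : Nat), ∀ x ∈ posListN m b, b ≤ x := by
  induction m using Nat.strong_induction_on with
  | _ m ih =>
    intro b x hx
    rw [posListN] at hx
    by_cases hm : m = 0
    · simp [hm] at hx
    · rw [dif_neg hm] at hx
      rcases List.mem_append.1 hx with h | h
      · split at h <;> simp_all
      · have := ih (m / 2) (Nat.div_lt_self (Nat.pos_of_ne_zero hm) one_lt_two) (b + 1) x h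
        omega

-- posListN is strictly increasing
lemma posListN_chain (m : Nat) : ∀ (b : Nat), List.IsChain (· < ·) (posListN m b) := by
  induction m using Nat.strong_induction_on with
  | _ m ih =>
    intro b
    rw [posListN]
    by_cases hm : m = 0
    · simp [hm]
    · rw [dif_neg hm]
      have hlt := Nat.div_lt_self (Nat.pos_of_ne_zero hm) one_lt_two
      have ihc := ih (m / 2) hlt (b + 1)
      by_cases h1 : m % 2 = 1
      · simp only [h1, if_pos rfl, List.singleton_append]
        refine List.isChain_cons.2 ⟨?_, ihc⟩
        intro y hy
        have hmem : y ∈ posListN (m / 2) (b + 1) := List.mem_of_mem_head? hy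
        have := posListN_ge (m / 2) (b + 1) y hmem
        omega
      · simpa [h1] using ihc

-- shifting the base shifts every position
lemma posListN_shift (m : Nat) : ∀ (b : Nat),
    posListN m (b + 1) = (posListN m b).map Nat.succ := by
  induction m using Nat.strong_induction_on with
  | _ m ih =>
    intro b
    conv_lhs => rw [posListN]
    conv_rhs => rw [posListN]
    by_cases hm : m = 0
    · simp [hm]
    · rw [dif_neg hm, dif_neg hm]
      rw [List.map_append, ← ih (m / 2) (Nat.div_lt_self (Nat.pos_of_ne_zero hm) one_lt_two) (b + 1)]
      by_cases h1 : m % 2 = 1 <;> simp [h1, Nat.succ_eq_add_one]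

-- B's comprehension computes exactly posListN m 0
lemma filter_eq_posListN (m : Nat) (hm : m ≠ 0) :
    (List.range (Nat.log2 m + 1)).filter (fun i => m >>> i % 2 == 1) = posListN m 0 := by
  induction m using Nat.strong_induction_on with
  | _ m ih =>
    rw [posListN, dif_neg hm]
    rcases Nat.lt_or_ge m 2 with h2 | h2
    · have hm1 : m = 1 := by omega
      subst hm1
      have hnil : posListN (1 / 2) (0 + 1) = [] := by rw [posListN]; simp
      rw [hnil]
      decide
    · have hlog : Nat.log2 m = Nat.log2 (m / 2) + 1 := by
        rw [Nat.log2_def]; simp [h2]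
      have hd2 : m / 2 ≠ 0 := by omega
      have hih := ih (m / 2) (Nat.div_lt_self (by omega) one_lt_two) hd2
      rw [hlog, List.range_succ_eq_map, List.filter_cons, List.filter_map]
      have hshift : ∀ i : Nat, m >>> (i + 1) % 2 = (m / 2) >>> i % 2 := by
        intro i
        simp [Nat.shiftRight_eq_div_pow, Nat.div_div_eq_div_mul, pow_succ]
        ring_nf
      have hfun : (fun i => m >>> i % 2 == 1) ∘ Nat.succ = (fun i => (m / 2) >>> i % 2 == 1) := by
        funext i
        simp [Function.comp, Nat.succ_eq_add_one, hshift i]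
      rw [hfun, hih, posListN_shift]
      have h0 : m >>> 0 % 2 = m % 2 := by simp
      by_cases h1 : m % 2 = 1
      · simp [h0, h1, Nat.succ_eq_add_one]
      · have : m % 2 = 0 := by omega
        simp [h0, this, Nat.succ_eq_add_one]

-- the abstracted loop over a real previous position is a running max of consecutive diffs
lemma gapFold_eq_foldl (ps : List Nat) : ∀ (p : Nat) (maxg : Int),
    gapFold ps (p : Int) maxg =
      ((((p :: ps).zip ps).map (fun q => ((q.2 : Int)) - (q.1 : Int))).foldl max maxg) := by
  induction ps with
  | nil => intro p maxg; simp [gapFold]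
  | cons q qs ih =>
    intro p maxg
    have hne : (p : Int) ≠ -1 := by omega
    simp only [gapFold, if_pos hne, List.zip_cons_cons, List.map_cons, List.foldl_cons]
    exact ih q _

-- Int-valued max over a list with positive head, as B computes it, equals the running max from 0
lemma maxD_eq_foldl (g : Int) (t : List Int) (hg : 0 < g) :
    (PySem.List.max? (g :: t) (fun x => x)).getD 0 = (g :: t).foldl max 0 := by
  rw [PySem.List.max?_id_cons]
  simp only [Option.getD_some, List.foldl_cons]
  have : max 0 g = g := by omega
  rw [this]

-- ===== VERDICT (by name: the statement is the Claim_ definition above) =====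
theorem binaryGap_spec : Claim_equal_binaryGap := by
  intro n _
  unfold Spec_binaryGap binaryGap binaryGap_alt
  by_cases hn : n ≤ 0
  · rw [binaryGapLoop]
    simp [hn, not_lt.2 hn]
  · push_neg at hn
    rw [if_neg (not_le.2 hn)]
    have hm0 : n.toNat ≠ 0 := by omega
    have hcast : ((n.toNat : Int)) = n := Int.toNat_of_nonneg (le_of_lt hn)
    have h1 : binaryGapLoop n (-1) 0 0 = gapFold (posListN n.toNat 0) (-1) 0 := by
      rw [← hcast]
      exact_mod_cast loop_eq n.toNat 0 (-1) 0
    rw [h1]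
    simp only [filter_eq_posListN n.toNat hm0]
    rcases hps : posListN n.toNat 0 with _ | ⟨a, _ | ⟨b, t⟩⟩
    · simp [gapFold, PySem.List.max?]
    · simp [gapFold, PySem.List.max?]
    · have hchain := posListN_chain n.toNat 0
      rw [hps] at hchain
      have hab : a < b := by
        have := (List.isChain_cons.1 hchain).1 b
        simp at this
        exact this
      have hA : gapFold (a :: b :: t) (-1) 0 = gapFold (b :: t) ((a : Nat) : Int) 0 := by
        simp [gapFold]
      rw [hA, gapFold_eq_foldl (b :: t) a 0]
      simp only [List.tail_cons, List.zip_cons_cons, List.map_cons]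
      rw [maxD_eq_foldl _ _ (by push_cast; omega)]
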